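-- pv_equiv track=rewrite | github.com/TrinhLK/BNPython | stg.py | generate_all_states
-- ===== SOURCE A (Python) =====
-- import itertools
--
-- def generate_all_states(nodes):
--     all_states = list(itertools.product([0, 1], repeat=len(nodes)))
--     result = []
--     for elm in all_states:
--         a_dict = {}
--         list_keys = list(nodes)
--         list_values = list(elm)
--         res = {list_keys[i]: list_values[i] for i in range(len(list_keys))}
--         result.append(res)
--     return result
-- ===== SOURCE B (Python) =====
-- def generate_all_states(nodes):
--     # Incremental doubling: start from the single empty state and, for each node
--     # in order, split every partial state into its 0- and 1-extension.
--     states = [{}]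
--     for k in nodes:
--         states = [{**s, k: b} for s in states for b in (0, 1)]
--     return states
-- ===== Notes on version B (the rewrite author's own statement) =====
-- stated objective: idiomatic
-- what changed: B drops itertools.product and the index-based dict comprehension: it builds the state list by incremental doubling, starting from [{}] and, for each node in order, replacing every partial state by its 0- and 1-extensions, so no tuple list, integer indexing or range loop is needed.
import Mathlib
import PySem

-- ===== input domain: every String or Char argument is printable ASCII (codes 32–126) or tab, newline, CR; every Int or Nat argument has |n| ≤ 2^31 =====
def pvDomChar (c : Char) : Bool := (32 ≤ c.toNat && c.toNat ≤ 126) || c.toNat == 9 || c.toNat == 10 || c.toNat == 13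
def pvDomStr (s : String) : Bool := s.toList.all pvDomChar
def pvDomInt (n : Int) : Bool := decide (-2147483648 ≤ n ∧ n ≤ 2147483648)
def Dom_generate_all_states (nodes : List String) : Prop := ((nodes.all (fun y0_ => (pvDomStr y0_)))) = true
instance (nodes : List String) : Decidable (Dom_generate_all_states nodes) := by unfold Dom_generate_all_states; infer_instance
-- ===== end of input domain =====

-- B replaces itertools.product + index-based dict comprehension by incremental doubling of partial states; objective: idiomatic.

-- ===== PORT A =====
-- hand port of itertools.product([0,1], repeat=n): exact, leftmost position varies slowest
def pvProdA : Nat → List (List Int)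
  | 0 => [[]]
  | n+1 => ([0, 1] : List Int).flatMap (fun b => (pvProdA n).map (fun rest => b :: rest))

def generate_all_states (nodes : List String) : List (List (String × Int)) :=
  let all_states := pvProdA nodes.length
  all_states.foldl (fun result elm =>
    let list_keys := nodes
    let list_values := elm
    -- dict comprehension over range(len(list_keys)); indices are in range for both lists
    let res := (PySem.List.pyRange 0 (list_keys.length : Int) 1).foldl
      (fun d i => d.insert (PySem.List.pyGetD list_keys i "") (PySem.List.pyGetD list_values i 0))
      (PySem.Dict.empty : PySem.Dict String Int)
    result ++ [res.items]) []

-- ===== PORT B =====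
def generate_all_states_alt (nodes : List String) : List (List (String × Int)) :=
  let states := nodes.foldl
    (fun states k => states.flatMap (fun s => [s.insert k 0, s.insert k 1]))
    ([PySem.Dict.empty] : List (PySem.Dict String Int))
  states.map (fun s => s.items)

-- ===== PRECONDITION & SPEC =====
def Spec_generate_all_states (nodes : List String) (out : List (List (String × Int))) : Prop := out = generate_all_states_alt nodes
instance (nodes : List String) (out : List (List (String × Int))) : Decidable (Spec_generate_all_states nodes out) := by unfold Spec_generate_all_states; infer_instance

-- ===== CLAIM (what is proved, stated in full; the proofs are below) =====
def Claim_equal_generate_all_states : Prop := ∀ (nodes : List String), Dom_generate_all_states nodes → Spec_generate_all_states nodes (generate_all_states nodes)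

-- ===== LEMMAS AND PROOFS =====

-- insert the keys one at a time, consuming the value list in step
def pvInsAll : PySem.Dict String Int → List String → List Int → PySem.Dict String Int
  | d, [], _ => d
  | d, _ :: _, [] => d
  | d, k :: ks, v :: vs => pvInsAll (d.insert k v) ks vs

theorem pvProdA_len (n : Nat) : ∀ vs ∈ pvProdA n, vs.length = n := by
  induction n with
  | zero => intro vs h; simp [pvProdA] at h; simp [h]
  | succ n ih =>
    intro vs h
    simp only [pvProdA, List.mem_flatMap, List.mem_map] at h
    obtain ⟨b, _, rest, hrest, hvs⟩ := h
    subst hvs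
    simp [ih rest hrest]

-- A's index-based dict comprehension equals structural insertion
theorem pvLemA (K : List String) (V : List Int) (hKV : K.length = V.length) :
    ∀ (a : Nat) (d : PySem.Dict String Int), a ≤ K.length →
    (PySem.List.pyRange (a : Int) (K.length : Int) 1).foldl
      (fun d i => d.insert (PySem.List.pyGetD K i "") (PySem.List.pyGetD V i 0)) d
    = pvInsAll d (K.drop a) (V.drop a) := by
  intro a d ha
  induction hh : K.length - a generalizing a d with
  | zero =>
    have : a = K.length := by omega
    subst this
    rw [PySem.List.pyRange_one_eq_nil (le_refl _), List.drop_length]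
    rfl
  | succ m ih =>
    have halt : a < K.length := by omega
    have havt : a < V.length := by omega
    rw [PySem.List.pyRange_one_cons (by exact_mod_cast halt), List.foldl_cons]
    rw [List.drop_eq_getElem_cons halt, List.drop_eq_getElem_cons havt, pvInsAll]
    rw [show ((a : Int) + 1) = ((a + 1 : Nat) : Int) from by push_cast; ring]
    rw [ih (a+1) _ (by omega) (by omega)]
    congr 2
    · rw [PySem.List.pyGetD_natCast, List.getD_eq_getElem _ _ halt]
    · rw [PySem.List.pyGetD_natCast, List.getD_eq_getElem _ _ havt]

-- B's doubling loop enumerates, for each seed dict, all product rows in order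
theorem pvLemB (ks : List String) : ∀ (ds : List (PySem.Dict String Int)),
    ks.foldl (fun states k => states.flatMap (fun s => [s.insert k 0, s.insert k 1])) ds
    = ds.flatMap (fun d => (pvProdA ks.length).map (fun vs => pvInsAll d ks vs)) := by
  induction ks with
  | nil => intro ds; simp [pvProdA, pvInsAll]
  | cons k ks ih =>
    intro ds
    rw [List.foldl_cons, ih, List.flatMap_assoc]
    apply List.flatMap_congr  -- pointwise equality of the inner functions
    · intro d _
      simp only [pvProdA, List.length_cons, List.flatMap_cons,
        List.flatMap_nil, List.append_nil, List.map_append, List.map_map]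
      rfl

-- ===== VERDICT (by name: the statement is the Claim_ definition above) =====
theorem generate_all_states_spec : Claim_equal_generate_all_states := by
  intro nodes _
  unfold Spec_generate_all_states generate_all_states generate_all_states_alt
  rw [PySem.List.foldl_append_singleton_eq_map, List.nil_append, pvLemB]
  simp only [List.flatMap_cons, List.flatMap_nil, List.append_nil, List.map_map]
  apply List.map_congr_left
  intro elm helm
  have hlen : elm.length = nodes.length := pvProdA_len _ _ helm
  have h := pvLemA nodes elm hlen.symm 0 PySem.Dict.empty (Nat.zero_le _)
  simp only [Nat.cast_zero, List.drop_zero] at h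
  simp only [h]
  rfl
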